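-- pv_equiv track=rewrite | github.com/daniel-reich/ubiquitous-fiesta | H6J4o4jqGbffYXe3Y_24.py | relation_lst
-- ===== SOURCE A (Python) =====
-- def relation_lst(lst):
--   lst = sorted(lst)
--   lst2 = []
--   for i in lst:
--     for j in lst:
--       if j>=i:
--         lst2.append((i,j))
--   return lst2
-- ===== SOURCE B (Python) =====
-- def relation_lst(lst):
--     s = sorted(lst)
--     n = len(s)
--     out = []
--     for i in s:
--         # binary search: first index whose value is >= i (bisect_left by hand)
--         lo, hi = 0, n
--         while lo < hi:
--             mid = (lo + hi) // 2
--             if s[mid] < i: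
--                 lo = mid + 1
--             else:
--                 hi = mid
--         out.extend((i, j) for j in s[lo:])
--     return out
-- ===== Notes on version B (the rewrite author's own statement) =====
-- stated objective: alternative
-- what changed: Replaces A's inner full scan testing j>=i for every j with a hand-written binary search for the first qualifying index in the sorted list, then emits the contiguous suffix directly; the output itself is Theta(n^2) pairs, so overall cost is unchanged.
import Mathlib
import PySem

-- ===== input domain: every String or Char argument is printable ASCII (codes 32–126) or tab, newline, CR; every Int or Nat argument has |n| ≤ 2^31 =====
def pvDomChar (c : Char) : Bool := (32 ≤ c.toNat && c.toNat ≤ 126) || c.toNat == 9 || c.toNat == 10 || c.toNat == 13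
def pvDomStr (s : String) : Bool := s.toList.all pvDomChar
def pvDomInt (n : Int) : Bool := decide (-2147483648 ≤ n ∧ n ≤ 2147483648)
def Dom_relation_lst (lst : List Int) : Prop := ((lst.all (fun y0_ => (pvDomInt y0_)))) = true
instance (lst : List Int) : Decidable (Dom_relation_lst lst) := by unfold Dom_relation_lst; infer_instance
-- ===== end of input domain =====

-- B replaces A's inner full scan (test j>=i on every j) by a hand-written binary
-- search for the first index with value >= i in the sorted list, then emits the
-- contiguous qualifying suffix directly (objective: alternative; building the pairs dominates, so not faster).


-- ===== PORT A =====
def relation_lst (lst : List Int) : List (Int × Int) :=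
  let s := PySem.List.sorted lst (fun x => x)
  s.foldl (fun lst2 i =>
    s.foldl (fun lst2 j => if i ≤ j then lst2 ++ [(i, j)] else lst2) lst2) []

-- ===== PORT B =====
-- Source B's hand-written bisect_left loop: while lo < hi: mid=(lo+hi)//2; lo/hi update.
-- s[mid] is ported as s.getD mid 0: 0 ≤ lo ≤ mid < hi ≤ len s throughout, so it is exact.
def blAux (s : List Int) (x : Int) (lo hi : Nat) : Nat :=
  if lo < hi then
    let mid := (lo + hi) / 2
    if s.getD mid 0 < x then blAux s x (mid + 1) hi else blAux s x lo mid
  else lo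
termination_by hi - lo
decreasing_by all_goals omega

-- s[lo:] with 0 ≤ lo ≤ len s is exactly List.drop lo s
def relation_lst_alt (lst : List Int) : List (Int × Int) :=
  let s := PySem.List.sorted lst (fun x => x)
  s.foldl (fun out i =>
    out ++ (s.drop (blAux s i 0 s.length)).map (fun j => (i, j))) []

-- ===== PRECONDITION & SPEC =====
def Spec_relation_lst (lst : List Int) (out : List (Int × Int)) : Prop := out = relation_lst_alt lst
instance (lst : List Int) (out : List (Int × Int)) : Decidable (Spec_relation_lst lst out) := by unfold Spec_relation_lst; infer_instance

-- ===== CLAIM (what is proved, stated in full; the proofs are below) =====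
def Claim_equal_relation_lst : Prop := ∀ (lst : List Int), Dom_relation_lst lst → Spec_relation_lst lst (relation_lst lst)

-- ===== LEMMAS AND PROOFS =====

-- binary-search invariant: on a sorted list, blAux returns the first index ≥ lo
-- whose element is ≥ x (restricted to [lo, hi)), with everything below it < x.
theorem blAux_spec (s : List Int) (x : Int) :
    ∀ (fuel lo hi : Nat), hi - lo ≤ fuel → lo ≤ hi → hi ≤ s.length →
    s.Pairwise (· ≤ ·) →
    lo ≤ blAux s x lo hi ∧ blAux s x lo hi ≤ hi ∧
    (∀ k (hk : k < s.length), lo ≤ k → k < blAux s x lo hi → s[k] < x) ∧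
    (∀ k (hk : k < s.length), blAux s x lo hi ≤ k → k < hi → x ≤ s[k]) := by
  intro fuel
  induction fuel with
  | zero =>
    intro lo hi hf hlh _ _
    have : lo = hi := by omega
    subst this
    rw [blAux]
    simp
    constructor
    · intro k hk h1 h2; omega
    · intro k hk h1 h2; omega
  | succ f ih =>
    intro lo hi hf hlh hhi hsort
    rw [blAux]
    by_cases hlt : lo < hi
    · simp only [hlt, if_true]
      have hmid1 : lo ≤ (lo + hi) / 2 := by omega
      have hmid2 : (lo + hi) / 2 < hi := by omega
      have hmlen : (lo + hi) / 2 < s.length := by omega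
      have hget : s.getD ((lo + hi) / 2) 0 = s[(lo + hi) / 2] := by
        exact List.getD_eq_getElem s 0 hmlen
      have hmono : ∀ p q (hp : p < s.length) (hq : q < s.length), p ≤ q → s[p] ≤ s[q] := by
        intro p q hp hq hpq
        rcases Nat.lt_or_ge p q with h | h
        · exact (List.pairwise_iff_getElem.mp hsort) p q hp hq h
        · have : p = q := by omega
          subst this; rfl
      by_cases hc : s.getD ((lo + hi) / 2) 0 < x
      · simp only [hc, if_true]
        obtain ⟨h1, h2, h3, h4⟩ := ih ((lo + hi) / 2 + 1) hi (by omega) (by omega) hhi hsort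
        refine ⟨by omega, h2, ?_, h4⟩
        intro k hk hlo hk2
        by_cases hkm : k < (lo + hi) / 2 + 1
        · calc s[k] ≤ s[(lo + hi) / 2] := hmono k _ hk hmlen (by omega)
            _ < x := by rw [← hget]; exact hc
        · exact h3 k hk (by omega) hk2
      · simp only [hc, if_false]
        obtain ⟨h1, h2, h3, h4⟩ := ih lo ((lo + hi) / 2) (by omega) (by omega) (by omega) hsort
        refine ⟨h1, by omega, h3, ?_⟩
        intro k hk hr hk2
        by_cases hkm : k < (lo + hi) / 2
        · exact h4 k hk hr hkm
        · calc x ≤ s[(lo + hi) / 2] := by rw [← hget]; omega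
            _ ≤ s[k] := hmono _ k hmlen hk (by omega)
    · simp only [hlt, if_false]
      exact ⟨Nat.le_refl lo, by omega, by intro k hk h1 h2; omega, by intro k hk h1 h2; omega⟩

-- if everything before index r is < x and everything from r on is ≥ x, then
-- filtering with (x ≤ ·) is dropping the first r elements.
theorem filter_eq_drop (x : Int) :
    ∀ (s : List Int) (r : Nat), r ≤ s.length →
    (∀ k (hk : k < s.length), k < r → s[k] < x) →
    (∀ k (hk : k < s.length), r ≤ k → x ≤ s[k]) →
    s.filter (fun j => x ≤ j) = s.drop r := by
  intro s
  induction s with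
  | nil => intro r _ _ _; simp
  | cons a t iht =>
    intro r hr hlow hhigh
    cases r with
    | zero =>
      rw [List.drop_zero, List.filter_eq_self.mpr]
      intro b hb
      rw [List.mem_iff_getElem] at hb
      obtain ⟨k, hk, hbk⟩ := hb
      subst hbk
      exact decide_eq_true (hhigh k hk (Nat.zero_le k))
    | succ r' =>
      have ha : a < x := hlow 0 (by simp) (Nat.succ_pos r')
      rw [List.drop_succ_cons, List.filter_cons]
      simp only [decide_eq_true_eq]
      rw [if_neg (by omega)]
      apply iht r' (by simpa using hr)
      · intro k hk hkr
        have := hlow (k + 1) (by simpa using hk) (by omega)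
        simpa using this
      · intro k hk hkr
        have := hhigh (k + 1) (by simpa using hk) (by omega)
        simpa using this

-- ===== VERDICT (by name: the statement is the Claim_ definition above) =====
theorem relation_lst_spec : Claim_equal_relation_lst := by
  intro lst _
  unfold Spec_relation_lst relation_lst relation_lst_alt
  set s := PySem.List.sorted lst (fun x => x) with hs
  have hsort : s.Pairwise (· ≤ ·) := PySem.List.sorted_pairwise lst (fun x => x)
  apply List.foldl_ext
  intro acc i _
  have hf := PySem.List.foldl_append_if (fun j => decide (i ≤ j)) (fun j => (i, j)) s acc
  simp only [decide_eq_true_eq] at hf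
  rw [hf]
  obtain ⟨h1, h2, h3, h4⟩ := blAux_spec s i s.length 0 s.length (by omega) (by omega) (le_refl _) hsort
  rw [filter_eq_drop i s (blAux s i 0 s.length) h2
    (fun k hk hkr => h3 k hk (Nat.zero_le k) hkr)
    (fun k hk hkr => h4 k hk hkr hk)]
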